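-- pv_equiv track=rewrite | github.com/bghira/SimpleTuner | simpletuner/helpers/training/lora_format.py | detect_state_dict_format
-- ===== SOURCE A (Python) =====
-- from enum import Enum
-- from typing import Any, Dict, Optional, Tuple
--
-- class PEFTLoRAFormat(str, Enum):
--     DIFFUSERS = "diffusers"
--     COMFYUI = "comfyui"
--
-- def detect_state_dict_format(state_dict: Dict[str, Any]) -> Optional[PEFTLoRAFormat]:
--     """
--     Heuristically detect whether a state dict looks like ComfyUI-style or Diffusers/PEFT-style.
--     Returns None when no keys are present.
--     """
--     if not state_dict:
--         return None
--
--     keys = list(state_dict.keys())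
--     comfy_prefix_hits = sum(k.startswith("diffusion_model.") for k in keys)
--     comfy_alpha_hits = sum(k.endswith(".alpha") for k in keys)
--     comfy_ab_hits = sum(".lora_A" in k or ".lora_B" in k for k in keys)
--     diffusers_down_up_hits = sum(".lora.down" in k or ".lora.up" in k for k in keys)
--
--     if comfy_prefix_hits or (comfy_alpha_hits and diffusers_down_up_hits == 0):
--         return PEFTLoRAFormat.COMFYUI
--     if comfy_ab_hits and diffusers_down_up_hits == 0 and comfy_prefix_hits >= 0:
--         return PEFTLoRAFormat.COMFYUI
--     return PEFTLoRAFormat.DIFFUSERS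
-- ===== SOURCE B (Python) =====
-- from enum import Enum
-- from typing import Any, Dict, Optional
--
-- class PEFTLoRAFormat(str, Enum):
--     DIFFUSERS = "diffusers"
--     COMFYUI = "comfyui"
--
-- def detect_state_dict_format(state_dict: Dict[str, Any]) -> Optional[PEFTLoRAFormat]:
--     if not state_dict:
--         return None
--     # Single early-exit scan: a 'diffusion_model.' prefix is decisive on its own
--     # (it forces COMFYUI regardless of any other key), so return immediately on it.
--     # Otherwise accumulate just two flags: a weak comfy signal (alpha or lora_A/B key)
--     # and a diffusers signal (lora.down/up key), and decide after the scan.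
--     weak_comfy = False
--     diffusers_marker = False
--     for k in state_dict:
--         if k.startswith("diffusion_model."):
--             return PEFTLoRAFormat.COMFYUI
--         if k.endswith(".alpha") or ".lora_A" in k or ".lora_B" in k:
--             weak_comfy = True
--         if ".lora.down" in k or ".lora.up" in k:
--             diffusers_marker = True
--     if weak_comfy and not diffusers_marker:
--         return PEFTLoRAFormat.COMFYUI
--     return PEFTLoRAFormat.DIFFUSERS
-- ===== Notes on version B (the rewrite author's own statement) =====
-- stated objective: simpler
-- what changed: Replaces four independent counting passes combined by a boolean formula with one early-exit scan organised as a decision hierarchy: the decisive 'diffusion_model.' prefix returns COMFYUI immediately, the two weak comfy signals (alpha, lora_A/B) are merged into a single flag, and only the weak-signal-vs-downup comparison is decided after the scan (the vacuous 'comfy_prefix_hits >= 0' test disappears).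
import Mathlib
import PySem

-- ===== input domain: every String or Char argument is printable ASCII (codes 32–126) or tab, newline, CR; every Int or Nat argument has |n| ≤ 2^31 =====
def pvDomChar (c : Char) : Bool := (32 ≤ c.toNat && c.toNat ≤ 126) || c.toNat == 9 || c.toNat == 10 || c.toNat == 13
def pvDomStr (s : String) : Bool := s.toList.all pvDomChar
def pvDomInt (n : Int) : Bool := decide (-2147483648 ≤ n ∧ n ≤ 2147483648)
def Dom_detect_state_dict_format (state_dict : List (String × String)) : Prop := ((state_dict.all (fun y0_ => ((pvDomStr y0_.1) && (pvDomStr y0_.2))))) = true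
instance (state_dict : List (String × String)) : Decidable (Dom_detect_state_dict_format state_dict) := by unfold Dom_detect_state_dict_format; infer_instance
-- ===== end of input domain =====

-- B replaces A's four counting passes and boolean formula with one early-exit scan: the
-- decisive prefix returns immediately, two merged flags decide afterwards; same return value.
-- ===== PORT A =====
def detect_state_dict_format (state_dict : List (String × String)) : Option String :=
  if state_dict = [] then none
  else
    let keys := state_dict.map Prod.fst
    let comfy_prefix_hits : Int := (keys.map (fun k => if PySem.Str.startswith k "diffusion_model." then (1:Int) else 0)).sum
    let comfy_alpha_hits : Int := (keys.map (fun k => if PySem.Str.endswith k ".alpha" then (1:Int) else 0)).sum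
    let comfy_ab_hits : Int := (keys.map (fun k => if PySem.Str.isIn ".lora_A" k || PySem.Str.isIn ".lora_B" k then (1:Int) else 0)).sum
    let diffusers_down_up_hits : Int := (keys.map (fun k => if PySem.Str.isIn ".lora.down" k || PySem.Str.isIn ".lora.up" k then (1:Int) else 0)).sum
    if comfy_prefix_hits ≠ 0 ∨ (comfy_alpha_hits ≠ 0 ∧ diffusers_down_up_hits = 0) then some "comfyui"
    else if comfy_ab_hits ≠ 0 ∧ diffusers_down_up_hits = 0 ∧ comfy_prefix_hits ≥ 0 then some "comfyui"
    else some "diffusers"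

-- ===== PORT B =====
-- the early-exit for-loop of Source B: returns "comfyui" at the first decisive prefix key,
-- otherwise carries the two flags to the post-loop decision
def dsdScan : List (String × String) → Bool → Bool → Option String
  | [], weak_comfy, diffusers_marker =>
      if weak_comfy && !diffusers_marker then some "comfyui" else some "diffusers"
  | kv :: rest, weak_comfy, diffusers_marker =>
      let k := kv.1
      if PySem.Str.startswith k "diffusion_model." then some "comfyui"
      else
        dsdScan rest
          (weak_comfy || (PySem.Str.endswith k ".alpha" || PySem.Str.isIn ".lora_A" k || PySem.Str.isIn ".lora_B" k))
          (diffusers_marker || (PySem.Str.isIn ".lora.down" k || PySem.Str.isIn ".lora.up" k))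

def detect_state_dict_format_alt (state_dict : List (String × String)) : Option String :=
  if state_dict = [] then none
  else dsdScan state_dict false false

-- ===== PRECONDITION & SPEC =====
def Spec_detect_state_dict_format (state_dict : List (String × String)) (out : Option String) : Prop := out = detect_state_dict_format_alt state_dict
instance (state_dict : List (String × String)) (out : Option String) : Decidable (Spec_detect_state_dict_format state_dict out) := by unfold Spec_detect_state_dict_format; infer_instance

-- ===== CLAIM (what is proved, stated in full; the proofs are below) =====
def Claim_equal_detect_state_dict_format : Prop := ∀ (state_dict : List (String × String)), Dom_detect_state_dict_format state_dict → Spec_detect_state_dict_format state_dict (detect_state_dict_format state_dict)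

-- ===== LEMMAS AND PROOFS =====

theorem sum_ite_ne_zero_iff_any {α : Type} (l : List α) (p : α → Bool) :
    (l.map (fun k => if p k then (1:Int) else 0)).sum ≠ 0 ↔ l.any p = true := by
  induction l with
  | nil => simp
  | cons x xs ih =>
    simp only [List.map_cons, List.sum_cons, List.any_cons]
    by_cases h : p x = true <;> simp [h, ih]
    · intro _
      have : (0:Int) ≤ (xs.map (fun k => if p k then (1:Int) else 0)).sum := by
        apply List.sum_nonneg; intro y hy
        simp only [List.mem_map] at hy
        obtain ⟨z, _, rfl⟩ := hy
        split <;> omega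
      omega

theorem sum_ite_nonneg {α : Type} (l : List α) (p : α → Bool) :
    (0:Int) ≤ (l.map (fun k => if p k then (1:Int) else 0)).sum := by
  apply List.sum_nonneg; intro y hy
  simp only [List.mem_map] at hy
  obtain ⟨z, _, rfl⟩ := hy
  split <;> omega

-- characterisation of B's early-exit scan
theorem dsdScan_eq (l : List (String × String)) (c d : Bool) :
    dsdScan l c d =
      if l.any (fun kv => PySem.Str.startswith kv.1 "diffusion_model.") then some "comfyui"
      else if (c || l.any (fun kv => PySem.Str.endswith kv.1 ".alpha" || PySem.Str.isIn ".lora_A" kv.1 || PySem.Str.isIn ".lora_B" kv.1))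
              && !(d || l.any (fun kv => PySem.Str.isIn ".lora.down" kv.1 || PySem.Str.isIn ".lora.up" kv.1)) then some "comfyui"
      else some "diffusers" := by
  induction l generalizing c d with
  | nil => simp only [dsdScan, List.any_nil, Bool.or_false, Bool.false_eq_true, if_false]
  | cons x xs ih =>
    simp only [dsdScan, List.any_cons]
    cases hP : PySem.Str.startswith x.1 "diffusion_model." with
    | true => simp only [hP, Bool.true_or, if_true]
    | false =>
      simp only [hP, Bool.false_or, Bool.false_eq_true, if_false]
      rw [ih]
      simp only [Bool.or_assoc]

theorem any_or_split {α : Type} (l : List α) (q r : α → Bool) :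
    l.any (fun k => q k || r k) = (l.any q || l.any r) := by
  induction l with
  | nil => rfl
  | cons x xs ih =>
    simp only [List.any_cons, ih]
    cases q x <;> cases r x <;> cases xs.any q <;> cases xs.any r <;> rfl

-- A's counting if-chain equals B's decision tree, over abstract predicates
theorem decision_eq {α : Type} (l : List α) (p q r s : α → Bool) :
    (if (l.map (fun k => if p k then (1:Int) else 0)).sum ≠ 0 ∨
        ((l.map (fun k => if q k then (1:Int) else 0)).sum ≠ 0 ∧
         (l.map (fun k => if s k then (1:Int) else 0)).sum = 0) then some "comfyui"
     else if (l.map (fun k => if r k then (1:Int) else 0)).sum ≠ 0 ∧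
             (l.map (fun k => if s k then (1:Int) else 0)).sum = 0 ∧
             (l.map (fun k => if p k then (1:Int) else 0)).sum ≥ 0 then some "comfyui"
     else (some "diffusers" : Option String))
    = if l.any p then some "comfyui"
      else if l.any (fun k => q k || r k) && !l.any s then some "comfyui"
      else some "diffusers" := by
  have hp := sum_ite_ne_zero_iff_any l p
  have hq := sum_ite_ne_zero_iff_any l q
  have hr := sum_ite_ne_zero_iff_any l r
  have hs := sum_ite_ne_zero_iff_any l s
  have hpn := sum_ite_nonneg l p
  rw [any_or_split]
  cases hap : l.any p <;> cases haq : l.any q <;> cases har : l.any r <;> cases has : l.any s <;>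
    simp_all

-- ===== VERDICT (by name: the statement is the Claim_ definition above) =====
theorem detect_state_dict_format_spec : Claim_equal_detect_state_dict_format := by
  intro sd _
  unfold Spec_detect_state_dict_format detect_state_dict_format detect_state_dict_format_alt
  by_cases hnil : sd = []
  · simp [hnil]
  · simp only [if_neg hnil]
    rw [dsdScan_eq, decision_eq (sd.map Prod.fst)]
    simp only [List.any_map, Function.comp_def, Bool.or_assoc, Bool.false_or]
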